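-- pv_equiv track=rewrite | github.com/abzanganeh/movie-agent-service | src/movie_agent/service.py | _update_answer_with_validated_movies
-- ===== SOURCE A (Python) =====
-- from typing import Optional, List, Dict, Any
--
-- def _update_answer_with_validated_movies(
--
--     original_answer: str,
--     validated_movies: List[str],
--     original_movies: List[str]
-- ) -> str:
--     """
--     Update answer text to reflect validated movies.
--
--     :param original_answer: Original answer from agent
--     :param validated_movies: Filtered/validated movie list
--     :param original_movies: Original movie list before validation
--     :return: Updated answer text
--     """
--     if not validated_movies:
--         return (
--             "I couldn't find any movies matching your specific criteria. "
--             "The search results didn't match the requested year range or genre. "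
--             "Would you like to try a different search?"
--         )
--
--     if len(validated_movies) == len(original_movies):
--         return original_answer
--
--     if len(validated_movies) == 1:
--         movies_text = validated_movies[0]
--     elif len(validated_movies) == 2:
--         movies_text = f"{validated_movies[0]} and {validated_movies[1]}"
--     else:
--         movies_text = ", ".join(validated_movies[:-1]) + f", and {validated_movies[-1]}"
--
--     sentences = [s.strip() for s in original_answer.split('.') if s.strip()]
--     updated_sentences = []
--     found_movie_sentence = False
--
--     for sentence in sentences:
--         contains_original_movies = any(
--             movie.lower() in sentence.lower()
--             for movie in original_movies
--         )
--
--         if contains_original_movies and not found_movie_sentence: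
--             if "here are" in sentence.lower() or "movies" in sentence.lower():
--                 updated_sentences.append(f"Here are the movies matching your criteria: {movies_text}.")
--             else:
--                 updated_sentences.append(f"Here are the matching movies: {movies_text}.")
--             found_movie_sentence = True
--         else:
--             updated_sentences.append(sentence + ".")
--
--     updated_answer = " ".join(updated_sentences)
--
--     if len(validated_movies) < len(original_movies):
--         filtered_count = len(original_movies) - len(validated_movies)
--         updated_answer += f" (Note: {filtered_count} result(s) were filtered out as they didn't match your criteria.)"
--
--     return updated_answer.strip()
-- ===== SOURCE B (Python) =====
-- def _update_answer_with_validated_movies(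
--     original_answer,
--     validated_movies,
--     original_movies
-- ):
--     """Span-based rewrite: split the sentence list at the first sentence that
--     mentions an original movie (prefix / hit / suffix), then build the answer
--     from the three segments; no found-flag, no indices."""
--     if not validated_movies:
--         return (
--             "I couldn't find any movies matching your specific criteria. "
--             "The search results didn't match the requested year range or genre. "
--             "Would you like to try a different search?"
--         )
--
--     if len(validated_movies) == len(original_movies):
--         return original_answer
--
--     if len(validated_movies) == 1:
--         movies_text = validated_movies[0]
--     elif len(validated_movies) == 2:
--         movies_text = f"{validated_movies[0]} and {validated_movies[1]}"
--     else:
--         movies_text = ", ".join(validated_movies[:-1]) + f", and {validated_movies[-1]}"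
--
--     sentences = [s.strip() for s in original_answer.split('.') if s.strip()]
--
--     lowered_movies = [m.lower() for m in original_movies]
--
--     def mentions(sentence):
--         low = sentence.lower()
--         return any(m in low for m in lowered_movies)
--
--     # split into the prefix before the first mention and the remainder
--     pre = []
--     rest = sentences
--     while rest and not mentions(rest[0]):
--         pre.append(rest[0])
--         rest = rest[1:]
--
--     if rest:
--         hit, suffix = rest[0], rest[1:]
--         low = hit.lower()
--         if "here are" in low or "movies" in low:
--             repl = f"Here are the movies matching your criteria: {movies_text}."
--         else:
--             repl = f"Here are the matching movies: {movies_text}."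
--         parts = [s + "." for s in pre] + [repl] + [s + "." for s in suffix]
--     else:
--         parts = [s + "." for s in pre]
--
--     updated_answer = " ".join(parts)
--
--     if len(validated_movies) < len(original_movies):
--         filtered_count = len(original_movies) - len(validated_movies)
--         updated_answer += f" (Note: {filtered_count} result(s) were filtered out as they didn't match your criteria.)"
--
--     return updated_answer.strip()
-- ===== Notes on version B (the rewrite author's own statement) =====
-- stated objective: alternative
-- what changed: Replaces A's single pass with a mutable found-flag deciding per sentence by a span decomposition: the sentence list is split at the first sentence mentioning an original movie into prefix/hit/suffix segments (movies lowered once up front), and the answer is built by concatenating the three segments; the per-sentence conditional and the flag disappear.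
import Mathlib
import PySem

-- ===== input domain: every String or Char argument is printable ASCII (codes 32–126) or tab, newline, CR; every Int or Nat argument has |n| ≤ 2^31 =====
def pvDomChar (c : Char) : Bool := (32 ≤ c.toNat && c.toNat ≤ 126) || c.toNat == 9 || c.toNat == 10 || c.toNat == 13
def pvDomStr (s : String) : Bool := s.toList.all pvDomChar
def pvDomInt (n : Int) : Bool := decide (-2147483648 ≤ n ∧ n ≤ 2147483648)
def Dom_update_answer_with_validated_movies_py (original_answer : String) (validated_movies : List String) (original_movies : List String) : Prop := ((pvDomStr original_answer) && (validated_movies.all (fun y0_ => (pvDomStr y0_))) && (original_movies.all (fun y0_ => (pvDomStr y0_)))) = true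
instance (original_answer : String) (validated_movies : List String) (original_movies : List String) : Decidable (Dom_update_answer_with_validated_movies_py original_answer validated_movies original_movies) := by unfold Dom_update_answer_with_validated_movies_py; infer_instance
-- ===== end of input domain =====

-- B replaces A's single pass with a found-flag by a span decomposition: split the
-- sentence list at the first sentence mentioning an original movie into
-- prefix/hit/suffix and concatenate the three segments (objective: alternative).

-- ===== PORT A =====
-- the for-loop over sentences with the found_movie_sentence flag
def pvLoopA (original_movies : List String) (movies_text : String) :
    List String → Bool → List String
  | [], _ => []
  | sentence :: rest, found =>
    let contains_original_movies := original_movies.any (fun movie =>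
      PySem.Str.isIn (PySem.Str.lower movie) (PySem.Str.lower sentence))
    if contains_original_movies && !found then
      (if PySem.Str.isIn "here are" (PySem.Str.lower sentence) ||
          PySem.Str.isIn "movies" (PySem.Str.lower sentence) then
        "Here are the movies matching your criteria: " ++ movies_text ++ "."
      else
        "Here are the matching movies: " ++ movies_text ++ ".") ::
        pvLoopA original_movies movies_text rest true
    else
      (sentence ++ ".") :: pvLoopA original_movies movies_text rest found

def update_answer_with_validated_movies_py (original_answer : String) (validated_movies : List String) (original_movies : List String) : String :=
  if validated_movies.isEmpty then
    "I couldn't find any movies matching your specific criteria. The search results didn't match the requested year range or genre. Would you like to try a different search?"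
  else if validated_movies.length == original_movies.length then
    original_answer
  else
    let movies_text :=
      if validated_movies.length == 1 then
        PySem.List.pyGetD validated_movies 0 ""
      else if validated_movies.length == 2 then
        PySem.List.pyGetD validated_movies 0 "" ++ " and " ++ PySem.List.pyGetD validated_movies 1 ""
      else
        PySem.Str.join ", " (PySem.List.slice validated_movies none (some (-1))) ++ ", and " ++
          PySem.List.pyGetD validated_movies (-1) ""
    let sentences := (((PySem.Str.split? original_answer ".").getD []).filter
      (fun s => PySem.Str.strip s != "")).map PySem.Str.strip
    let updated_answer := PySem.Str.join " " (pvLoopA original_movies movies_text sentences false)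
    let updated_answer :=
      if validated_movies.length < original_movies.length then
        updated_answer ++ " (Note: " ++
          PySem.Int.toStr ((original_movies.length : Int) - (validated_movies.length : Int)) ++
          " result(s) were filtered out as they didn't match your criteria.)"
      else updated_answer
    PySem.Str.strip updated_answer

-- ===== PORT B =====
def pvMentionsB (lowered_movies : List String) (sentence : String) : Bool :=
  let low := PySem.Str.lower sentence
  lowered_movies.any (fun m => PySem.Str.isIn m low)

-- the while loop: pre/rest split at the first mentioning sentence
def pvSpanB (lowered_movies : List String) : List String → List String × List String
  | [] => ([], [])
  | s :: rest =>
    if pvMentionsB lowered_movies s then ([], s :: rest)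
    else
      let p := pvSpanB lowered_movies rest
      (s :: p.1, p.2)

def update_answer_with_validated_movies_py_alt (original_answer : String) (validated_movies : List String) (original_movies : List String) : String :=
  if validated_movies.isEmpty then
    "I couldn't find any movies matching your specific criteria. The search results didn't match the requested year range or genre. Would you like to try a different search?"
  else if validated_movies.length == original_movies.length then
    original_answer
  else
    let movies_text :=
      if validated_movies.length == 1 then
        PySem.List.pyGetD validated_movies 0 ""
      else if validated_movies.length == 2 then
        PySem.List.pyGetD validated_movies 0 "" ++ " and " ++ PySem.List.pyGetD validated_movies 1 ""
      else
        PySem.Str.join ", " (PySem.List.slice validated_movies none (some (-1))) ++ ", and " ++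
          PySem.List.pyGetD validated_movies (-1) ""
    let sentences := (((PySem.Str.split? original_answer ".").getD []).filter
      (fun s => PySem.Str.strip s != "")).map PySem.Str.strip
    let lowered_movies := original_movies.map PySem.Str.lower
    let sp := pvSpanB lowered_movies sentences
    let parts :=
      match sp.2 with
      | [] => sp.1.map (fun s => s ++ ".")
      | hit :: suffix =>
        let low := PySem.Str.lower hit
        let repl :=
          if PySem.Str.isIn "here are" low || PySem.Str.isIn "movies" low then
            "Here are the movies matching your criteria: " ++ movies_text ++ "."
          else
            "Here are the matching movies: " ++ movies_text ++ "."
        sp.1.map (fun s => s ++ ".") ++ repl :: suffix.map (fun s => s ++ ".")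
    let updated_answer := PySem.Str.join " " parts
    let updated_answer :=
      if validated_movies.length < original_movies.length then
        updated_answer ++ " (Note: " ++
          PySem.Int.toStr ((original_movies.length : Int) - (validated_movies.length : Int)) ++
          " result(s) were filtered out as they didn't match your criteria.)"
      else updated_answer
    PySem.Str.strip updated_answer

-- ===== PRECONDITION & SPEC =====
def Spec_update_answer_with_validated_movies_py (original_answer : String) (validated_movies : List String) (original_movies : List String) (out : String) : Prop := out = update_answer_with_validated_movies_py_alt original_answer validated_movies original_movies
instance (original_answer : String) (validated_movies : List String) (original_movies : List String) (out : String) : Decidable (Spec_update_answer_with_validated_movies_py original_answer validated_movies original_movies out) := by unfold Spec_update_answer_with_validated_movies_py; infer_instance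

-- ===== CLAIM (what is proved, stated in full; the proofs are below) =====
def Claim_equal_update_answer_with_validated_movies_py : Prop := ∀ (original_answer : String) (validated_movies : List String) (original_movies : List String), Dom_update_answer_with_validated_movies_py original_answer validated_movies original_movies → Spec_update_answer_with_validated_movies_py original_answer validated_movies original_movies (update_answer_with_validated_movies_py original_answer validated_movies original_movies)

-- ===== LEMMAS AND PROOFS =====

lemma pvLoopA_true (om : List String) (mt : String) (ss : List String) :
    pvLoopA om mt ss true = ss.map (fun s => s ++ ".") := by
  induction ss with
  | nil => simp [pvLoopA]
  | cons s rest ih => simp [pvLoopA, ih]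

lemma pvMentions_eq (om : List String) (s : String) :
    (om.any fun movie => PySem.Str.isIn (PySem.Str.lower movie) (PySem.Str.lower s)) =
      pvMentionsB (om.map PySem.Str.lower) s := by
  simp only [pvMentionsB, List.any_map]
  congr 1

lemma pvLoopA_eq_span (om : List String) (mt : String) : ∀ (ss : List String),
    pvLoopA om mt ss false =
      (match (pvSpanB (om.map PySem.Str.lower) ss).2 with
       | [] => (pvSpanB (om.map PySem.Str.lower) ss).1.map (fun s => s ++ ".")
       | hit :: suffix =>
         (pvSpanB (om.map PySem.Str.lower) ss).1.map (fun s => s ++ ".") ++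
           (if PySem.Str.isIn "here are" (PySem.Str.lower hit) ||
               PySem.Str.isIn "movies" (PySem.Str.lower hit) then
              "Here are the movies matching your criteria: " ++ mt ++ "."
            else
              "Here are the matching movies: " ++ mt ++ ".") ::
           suffix.map (fun s => s ++ ".")) := by
  intro ss
  induction ss with
  | nil => simp [pvLoopA, pvSpanB]
  | cons s rest ih =>
    cases hm : pvMentionsB (om.map PySem.Str.lower) s with
    | true =>
      simp only [pvLoopA, pvMentions_eq, hm, Bool.not_false, Bool.and_true, if_true,
        pvSpanB, pvLoopA_true]
      simp
    | false =>
      simp only [pvLoopA, pvMentions_eq, hm, Bool.false_and, Bool.false_eq_true, if_false,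
        pvSpanB, ih]
      cases (pvSpanB (om.map PySem.Str.lower) rest).2 with
      | nil => simp
      | cons hit suffix => simp

-- ===== VERDICT (by name: the statement is the Claim_ definition above) =====
theorem update_answer_with_validated_movies_py_spec : Claim_equal_update_answer_with_validated_movies_py := by
  intro oa vm om _
  unfold Spec_update_answer_with_validated_movies_py
  unfold update_answer_with_validated_movies_py update_answer_with_validated_movies_py_alt
  cases hE : vm.isEmpty with
  | true => simp only [if_true]
  | false =>
    simp only [Bool.false_eq_true, if_false]
    cases hlen : (vm.length == om.length) with
    | true => simp only [if_true]
    | false =>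
      simp only [Bool.false_eq_true, if_false]
      rw [pvLoopA_eq_span om _ _]
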